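-- pv_equiv track=rewrite | github.com/MrNefy/1_lab_4sem_JPEG_chan_vtl_3352 | jpegPY.py | preparing_for_coding_dc_and_ac
-- ===== SOURCE A (Python) =====
-- from typing import List, Tuple, Dict, Any
--
-- def dc_difference(data: List[int]) -> None:
-- 	size = len(data)
-- 	temp = []
-- 	for i in range(0, size, 64):
-- 		temp.append(data[i])
--
-- 	for i in range(64, size, 64):
-- 		data[i] -= temp[i//64 - 1]
--
-- def int_to_binary(num: int, positive: int = 1) -> List[int]:
-- 	if num == 0:
-- 		return [0]
--
-- 	if positive == 0:
-- 		num *= -1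
--
-- 	bits = []
-- 	while num > 0:
-- 		bits.append(1 if num % 2 == positive else 0)
-- 		num = num // 2
--
-- 	bits.reverse()
-- 	return bits
--
-- def rle_encode_ac(cur: int, out_rle: List[int], zero_count: int, EOB: bool, ZRL: bool, tempZRL: List[int]) -> bool:
-- 	if cur == 0:
-- 		zero_count[0] += 1
-- 		EOB[0] = True
-- 		if zero_count[0] == 15:
-- 			tempZRL.append(15)
-- 			tempZRL.append(0)
-- 			zero_count[0] = 0
-- 			ZRL[0] = True
-- 		return True
-- 	else:
-- 		if ZRL[0]:
-- 			out_rle.extend(tempZRL)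
-- 			tempZRL.clear()
-- 			ZRL[0] = False
--
-- 		out_rle.append(zero_count[0])
-- 		zero_count[0] = 0
-- 		EOB[0] = False
-- 		return False
--
-- def preparing_for_coding_dc_and_ac(data: List[int]) -> List[int]:
-- 	output = []
-- 	dc_difference(data)
--
-- 	size = len(data)
-- 	for i in range(0, size, 64):
-- 		# DC coefficient
-- 		if data[i] == 0:
-- 			output.append(0)
-- 		else:
-- 			if data[i] > 0:
-- 				temp = int_to_binary(data[i], 1)
-- 			else:
-- 				temp = int_to_binary(data[i], 0)
-- 			output.append(len(temp))
-- 			output.extend(temp)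
--
-- 		# AC coefficients
-- 		zero_count = [0]
-- 		EOB = [False]
-- 		ZRL = [False]
-- 		tempZRL = []
--
-- 		for j in range(1, 64):
-- 			if i + j >= size:
-- 				break
--
-- 			if rle_encode_ac(data[i + j], output, zero_count, EOB, ZRL, tempZRL):
-- 				continue
--
-- 			if data[i + j] >= 0:
-- 				temp = int_to_binary(data[i + j], 1)
-- 			else:
-- 				temp = int_to_binary(data[i + j], 0)
--
-- 			output.append(len(temp))
-- 			output.extend(temp)
--
-- 		if EOB[0]:
-- 			output.append(0)
-- 			output.append(0)
--
-- 	return output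
-- ===== SOURCE B (Python) =====
-- from typing import List
--
-- def dc_difference(data: List[int]) -> None:
-- 	size = len(data)
-- 	temp = []
-- 	for i in range(0, size, 64):
-- 		temp.append(data[i])
--
-- 	for i in range(64, size, 64):
-- 		data[i] -= temp[i//64 - 1]
--
-- def mag_bits(v: int) -> List[int]:
-- 	# JPEG magnitude bits: binary of |v|, bit-inverted when v is negative.
-- 	s = bin(abs(v))[2:]
-- 	if v < 0:
-- 		s = ''.join('1' if c == '0' else '0' for c in s)
-- 	return [int(c) for c in s]
--
-- def preparing_for_coding_dc_and_ac(data: List[int]) -> List[int]: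
-- 	dc_difference(data)
-- 	size = len(data)
-- 	out = []
-- 	for i in range(0, size, 64):
-- 		# DC coefficient
-- 		dc = data[i]
-- 		if dc == 0:
-- 			out.append(0)
-- 		else:
-- 			bits = mag_bits(dc)
-- 			out.append(len(bits))
-- 			out.extend(bits)
-- 		# AC coefficients: drop the trailing zero run, then a plain run-length scan
-- 		ac = data[i+1:i+64]
-- 		core = list(ac)
-- 		while core and core[-1] == 0:
-- 			core.pop()
-- 		run = 0
-- 		for v in core:
-- 			if v == 0:
-- 				run += 1
-- 				if run == 15:
-- 					out.append(15)
-- 					out.append(0)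
-- 					run = 0
-- 			else:
-- 				out.append(run)
-- 				bits = mag_bits(v)
-- 				out.append(len(bits))
-- 				out.extend(bits)
-- 				run = 0
-- 		if ac and ac[-1] == 0:
-- 			out.append(0)
-- 			out.append(0)
-- 	return out
-- ===== Notes on version B (the rewrite author's own statement) =====
-- stated objective: simpler
-- what changed: B replaces A's per-coefficient state machine (rle_encode_ac with one-element-list EOB/ZRL flags and a deferred tempZRL buffer) by first trimming the trailing zero run of each block's AC slice and then doing a plain run-length scan with a local integer counter, emitting ZRL pairs immediately; the EOB marker becomes a simple check on the last AC value.
import Mathlib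
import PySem

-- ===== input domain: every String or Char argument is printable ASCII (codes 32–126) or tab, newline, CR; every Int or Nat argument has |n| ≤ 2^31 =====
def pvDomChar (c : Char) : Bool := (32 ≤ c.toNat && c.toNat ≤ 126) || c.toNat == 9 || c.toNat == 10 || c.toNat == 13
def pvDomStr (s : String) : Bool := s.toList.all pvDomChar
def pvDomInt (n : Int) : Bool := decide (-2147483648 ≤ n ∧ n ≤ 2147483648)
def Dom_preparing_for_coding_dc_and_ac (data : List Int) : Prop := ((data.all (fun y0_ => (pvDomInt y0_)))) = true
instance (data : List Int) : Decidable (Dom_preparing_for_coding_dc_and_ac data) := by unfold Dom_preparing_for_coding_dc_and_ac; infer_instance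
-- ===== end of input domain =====

-- B re-decomposes the AC encoding: it trims the trailing zero run of each block's AC slice, then does a
-- plain run-length scan with a local counter, instead of A's flag/buffer state machine (rle_encode_ac with
-- EOB/ZRL cells and a deferred tempZRL buffer).  Return values are proved equal; the Python A (and B alike)
-- mutates `data` in place via dc_difference — the equivalence here is about the return value (B performs the
-- same mutation).

-- ===== PORT A =====
-- dc_difference: returns the mutated list (Python mutates `data` in place)
def pvDcDifference (data : List Int) : List Int :=
  let size : Int := data.length
  let temp := (PySem.List.pyRange 0 size 64).foldl
    (fun t i => t ++ [PySem.List.pyGetD data i 0]) []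
  (PySem.List.pyRange 64 size 64).foldl
    (fun d i => d.set i.toNat
      (PySem.List.pyGetD d i 0 - PySem.List.pyGetD temp (PySem.Int.floordiv i 64 - 1) 0)) data

-- the `while num > 0` loop of int_to_binary (bits appended LSB-first)
def pvIntToBinaryLoop (positive : Int) (num : Int) (bits : List Int) : List Int :=
  if h : 0 < num then
    pvIntToBinaryLoop positive (PySem.Int.floordiv num 2)
      (bits ++ [if PySem.Int.mod num 2 = positive then 1 else 0])
  else bits
termination_by num.toNat
decreasing_by
  rw [PySem.Int.floordiv_eq_ediv_of_pos (by omega : (0:Int) < 2)]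
  omega

def pvIntToBinary (num : Int) (positive : Int) : List Int :=
  if num = 0 then [0]
  else
    let n := if positive = 0 then num * (-1) else num
    (pvIntToBinaryLoop positive n []).reverse

-- rle_encode_ac: state is (out_rle, zero_count, EOB, ZRL, tempZRL); returns (the Python bool, new state)
def pvRleEncodeAc (cur : Int) (out : List Int) (zc : Int) (eob zrl : Bool) (t : List Int) :
    Bool × List Int × Int × Bool × Bool × List Int :=
  if cur = 0 then
    let zc := zc + 1
    if zc = 15 then (true, out, 0, true, true, t ++ [15, 0])
    else (true, out, zc, true, zrl, t)
  else
    let p := if zrl then (out ++ t, ([] : List Int), false) else (out, t, zrl)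
    (false, p.1 ++ [zc], 0, false, p.2.2, p.2.1)

-- the inner `for j in range(1, 64)` loop with its break
def pvAcLoop (data : List Int) (i : Int) (js : List Int)
    (out : List Int) (zc : Int) (eob zrl : Bool) (t : List Int) :
    List Int × Int × Bool × Bool × List Int :=
  match js with
  | [] => (out, zc, eob, zrl, t)
  | j :: js' =>
    if i + j ≥ (data.length : Int) then (out, zc, eob, zrl, t)
    else
      let cur := PySem.List.pyGetD data (i + j) 0
      match pvRleEncodeAc cur out zc eob zrl t with
      | (skip, out, zc, eob, zrl, t) =>
        if skip then pvAcLoop data i js' out zc eob zrl t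
        else
          let temp := if cur ≥ 0 then pvIntToBinary cur 1 else pvIntToBinary cur 0
          pvAcLoop data i js' (out ++ [(temp.length : Int)] ++ temp) zc eob zrl t

-- one iteration of A's outer block loop
def pvBlockA (data : List Int) (output : List Int) (i : Int) : List Int :=
  let d0 := PySem.List.pyGetD data i 0
  let output :=
    if d0 = 0 then output ++ [0]
    else
      let temp := if d0 > 0 then pvIntToBinary d0 1 else pvIntToBinary d0 0
      output ++ [(temp.length : Int)] ++ temp
  match pvAcLoop data i (PySem.List.pyRange 1 64 1) output 0 false false [] with
  | (out, _, eob, _, _) => if eob then out ++ [0, 0] else out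

def preparing_for_coding_dc_and_ac (data : List Int) : List Int :=
  let data := pvDcDifference data
  (PySem.List.pyRange 0 (data.length : Int) 64).foldl (pvBlockA data) []

-- ===== PORT B =====
-- bin(n)[2:] as a digit list, MSB first ("0" for n = 0)
def pvBinDigitsAux (n : Nat) : List Int :=
  if n = 0 then [] else pvBinDigitsAux (n / 2) ++ [((n % 2 : Nat) : Int)]
termination_by n
decreasing_by omega

def pvBinDigits (n : Nat) : List Int := if n = 0 then [0] else pvBinDigitsAux n

def pvMagBits (v : Int) : List Int :=
  let s := pvBinDigits v.natAbs
  if v < 0 then s.map (fun b => 1 - b) else s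

-- `while core and core[-1] == 0: core.pop()`
def pvTrim (l : List Int) : List Int :=
  if l.getLast? = some 0 then pvTrim l.dropLast else l
termination_by l.length
decreasing_by
  rename_i h
  have : l ≠ [] := by intro hnil; simp [hnil] at h
  simp [List.length_dropLast]
  cases l <;> simp_all

-- one iteration of B's run-length scan: state (out, run)
def pvStepB (s : List Int × Int) (v : Int) : List Int × Int :=
  if v = 0 then
    if s.2 + 1 = 15 then (s.1 ++ [15, 0], 0) else (s.1, s.2 + 1)
  else
    let bits := pvMagBits v
    (s.1 ++ [s.2, (bits.length : Int)] ++ bits, 0)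

-- one iteration of B's outer block loop
def pvBlockB (data : List Int) (out : List Int) (i : Int) : List Int :=
  let dc := PySem.List.pyGetD data i 0
  let out :=
    if dc = 0 then out ++ [0]
    else
      let bits := pvMagBits dc
      out ++ [(bits.length : Int)] ++ bits
  let ac := PySem.List.slice data (some (i + 1)) (some (i + 64))
  let core := pvTrim ac
  let out := (core.foldl pvStepB (out, 0)).1
  if ac.getLast? = some 0 then out ++ [0, 0] else out

def preparing_for_coding_dc_and_ac_alt (data : List Int) : List Int :=
  let data := pvDcDifference data
  (PySem.List.pyRange 0 (data.length : Int) 64).foldl (pvBlockB data) []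

-- ===== PRECONDITION & SPEC =====
def Spec_preparing_for_coding_dc_and_ac (data : List Int) (out : List Int) : Prop := out = preparing_for_coding_dc_and_ac_alt data
instance (data : List Int) (out : List Int) : Decidable (Spec_preparing_for_coding_dc_and_ac data out) := by unfold Spec_preparing_for_coding_dc_and_ac; infer_instance

-- ===== CLAIM (what is proved, stated in full; the proofs are below) =====
def Claim_equal_preparing_for_coding_dc_and_ac : Prop := ∀ (data : List Int), Dom_preparing_for_coding_dc_and_ac data → Spec_preparing_for_coding_dc_and_ac data (preparing_for_coding_dc_and_ac data)

-- ===== LEMMAS AND PROOFS =====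

-- A's appended token list for a nonzero coefficient
def pvEncA (v : Int) : List Int :=
  let temp := if v ≥ 0 then pvIntToBinary v 1 else pvIntToBinary v 0
  [(temp.length : Int)] ++ temp

-- A's inner loop rephrased as structural recursion over the list of AC values
def pvAcList : List Int → List Int → Int → Bool → Bool → List Int →
    List Int × Int × Bool × Bool × List Int
  | [], out, zc, eob, zrl, t => (out, zc, eob, zrl, t)
  | v :: vs, out, zc, eob, zrl, t =>
    if v = 0 then
      if zc + 1 = 15 then pvAcList vs out 0 true true (t ++ [15, 0])
      else pvAcList vs out (zc + 1) true zrl t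
    else
      pvAcList vs ((if zrl then out ++ t else out) ++ [zc] ++ pvEncA v) 0 false false
        (if zrl then [] else t)

def pvAnyNZ (vs : List Int) : Bool := vs.any (· ≠ 0)

-- the prefix of vs up to (and including) its last nonzero element
def pvTakeNZ : List Int → List Int
  | [] => []
  | v :: vs => if v = 0 then (if pvAnyNZ vs then 0 :: pvTakeNZ vs else []) else v :: pvTakeNZ vs

-- A's emitted AC tokens as a pure function of the values and pending state
def pvGFun : List Int → Int → List Int → List Int
  | [], _, _ => []
  | v :: vs, zc, t =>
    if v = 0 then
      if zc + 1 = 15 then pvGFun vs 0 (t ++ [15, 0]) else pvGFun vs (zc + 1) t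
    else t ++ [zc] ++ pvEncA v ++ pvGFun vs 0 []

-- B's emitted AC tokens as a pure function
def pvEmitR : List Int → Int → List Int
  | [], _ => []
  | v :: vs, run =>
    if v = 0 then
      if run + 1 = 15 then [15, 0] ++ pvEmitR vs 0 else pvEmitR vs (run + 1)
    else [run, ((pvMagBits v).length : Int)] ++ pvMagBits v ++ pvEmitR vs 0

-- the EOB flag as a pure function
def pvEobF : List Int → Bool → Bool
  | [], e => e
  | v :: vs, _ => pvEobF vs (decide (v = 0))


-- ---- magnitude-bit lemmas ----

lemma pvIntToBinaryLoop_one (n : Nat) (bits : List Int) :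
    pvIntToBinaryLoop 1 (n : Int) bits = bits ++ (pvBinDigitsAux n).reverse := by
  induction n using Nat.strong_induction_on generalizing bits with
  | _ n ih =>
    rw [pvIntToBinaryLoop, pvBinDigitsAux]
    by_cases h : n = 0
    · simp [h]
    · have hpos : (0:Int) < (n:Int) := by exact_mod_cast Nat.pos_of_ne_zero h
      rw [dif_pos hpos]
      have hd : PySem.Int.floordiv (n:Int) 2 = ((n / 2 : Nat) : Int) := by
        rw [PySem.Int.floordiv_eq_ediv_of_pos (by norm_num)]; omega
      have hm : PySem.Int.mod (n:Int) 2 = ((n % 2 : Nat) : Int) := by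
        rw [PySem.Int.mod_eq_emod_of_pos (by norm_num)]; omega
      rw [hd, hm, ih (n / 2) (Nat.div_lt_self (Nat.pos_of_ne_zero h) one_lt_two)]
      rcases Nat.mod_two_eq_zero_or_one n with hm2 | hm2 <;> simp [h, hm2]

lemma pvIntToBinaryLoop_zero (n : Nat) (bits : List Int) :
    pvIntToBinaryLoop 0 (n : Int) bits
      = bits ++ ((pvBinDigitsAux n).map (fun b => 1 - b)).reverse := by
  induction n using Nat.strong_induction_on generalizing bits with
  | _ n ih =>
    rw [pvIntToBinaryLoop, pvBinDigitsAux]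
    by_cases h : n = 0
    · simp [h]
    · have hpos : (0:Int) < (n:Int) := by exact_mod_cast Nat.pos_of_ne_zero h
      rw [dif_pos hpos]
      have hd : PySem.Int.floordiv (n:Int) 2 = ((n / 2 : Nat) : Int) := by
        rw [PySem.Int.floordiv_eq_ediv_of_pos (by norm_num)]; omega
      have hm : PySem.Int.mod (n:Int) 2 = ((n % 2 : Nat) : Int) := by
        rw [PySem.Int.mod_eq_emod_of_pos (by norm_num)]; omega
      rw [hd, hm, ih (n / 2) (Nat.div_lt_self (Nat.pos_of_ne_zero h) one_lt_two)]
      rcases Nat.mod_two_eq_zero_or_one n with hm2 | hm2 <;> simp [h, hm2]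

-- A's AC-coefficient bit string equals B's mag_bits
lemma pvACbits (v : Int) (hv : v ≠ 0) :
    (if v ≥ 0 then pvIntToBinary v 1 else pvIntToBinary v 0) = pvMagBits v := by
  rcases lt_trichotomy v 0 with hneg | rfl | hpos
  · obtain ⟨m, rfl⟩ : ∃ m : Nat, v = -(m : Int) := ⟨v.natAbs, by omega⟩
    have hm : m ≠ 0 := by omega
    rw [if_neg (by omega)]
    simp only [pvIntToBinary, pvMagBits, pvBinDigits]
    rw [if_neg hv, if_pos trivial, show (-(m:Int)) * (-1) = ((m:Nat) : Int) by ring,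
      pvIntToBinaryLoop_zero]
    simp [hm, hneg]
  · exact absurd rfl hv
  · obtain ⟨m, rfl⟩ : ∃ m : Nat, v = (m : Int) := ⟨v.toNat, by omega⟩
    have hm : m ≠ 0 := by omega
    rw [if_pos (by omega)]
    simp only [pvIntToBinary, pvMagBits, pvBinDigits]
    rw [if_neg hv, if_neg (by norm_num : (1:Int) ≠ 0), pvIntToBinaryLoop_one]
    simp [hm, show ¬ ((m:Int) < 0) by omega]

-- A's DC-coefficient bit string equals B's mag_bits
lemma pvDCbits (v : Int) (hv : v ≠ 0) :
    (if v > 0 then pvIntToBinary v 1 else pvIntToBinary v 0) = pvMagBits v := by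
  have h : (if v > 0 then pvIntToBinary v 1 else pvIntToBinary v 0)
       = (if v ≥ 0 then pvIntToBinary v 1 else pvIntToBinary v 0) := by
    split_ifs with h1 h2 h2 <;> first | rfl | omega
  rw [h]; exact pvACbits v hv

lemma pvEncA_eq (v : Int) (hv : v ≠ 0) :
    pvEncA v = ((pvMagBits v).length : Int) :: pvMagBits v := by
  unfold pvEncA
  rw [pvACbits v hv]
  rfl

-- ---- bridge: the index loop equals the list recursion ----

lemma pvAcLoop_eq_pvAcList (data : List Int) (i : Int) (hi : 0 ≤ i) :
    ∀ (n : Nat) (a : Int), 0 < a →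
    ∀ out zc eob zrl t,
      pvAcLoop data i (PySem.List.pyRange a (a + n) 1) out zc eob zrl t
        = pvAcList ((data.drop (i + a).toNat).take n) out zc eob zrl t := by
  intro n
  induction n with
  | zero =>
    intro a ha out zc eob zrl t
    rw [show a + ((0:Nat):Int) = a by simp, PySem.List.pyRange_one_eq_nil (le_refl a)]
    simp [pvAcLoop, pvAcList]
  | succ n ih =>
    intro a ha out zc eob zrl t
    rw [PySem.List.pyRange_one_cons (by push_cast; omega : a < a + ((n+1 : Nat):Int))]
    push_cast
    have hrec : ∀ out zc eob zrl t,
        pvAcLoop data i (PySem.List.pyRange (a+1) (a + (((n:Nat):Int) + 1)) 1) out zc eob zrl t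
          = pvAcList ((data.drop ((i + a).toNat + 1)).take n) out zc eob zrl t := by
      intro out zc eob zrl t
      rw [show a + (((n:Nat):Int) + 1) = (a+1) + ((n:Nat):Int) by ring, ih (a+1) (by omega),
        show (i + (a+1)).toNat = (i + a).toNat + 1 by omega]
    by_cases hge : i + a ≥ (data.length : Int)
    · rw [List.drop_eq_nil_of_le (by omega : data.length ≤ (i + a).toNat)]
      simp only [pvAcLoop, if_pos hge, List.take_nil, pvAcList]
    · have hk : (i + a).toNat < data.length := by omega
      have hcur : PySem.List.pyGetD data (i + a) 0 = data[(i + a).toNat] :=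
        PySem.List.pyGetD_eq_getElem data 0 (by omega) (by omega)
      rw [← List.getElem_cons_drop hk, List.take_succ_cons]
      simp only [pvAcLoop, if_neg hge, hcur]
      by_cases h1 : data[(i + a).toNat] = 0
      · by_cases h2 : zc + 1 = 15
        · simp only [pvRleEncodeAc, if_pos h1, if_pos h2]
          simp only [pvAcList, if_pos h1, if_pos h2]
          exact hrec _ _ _ _ _
        · simp only [pvRleEncodeAc, if_pos h1, if_neg h2]
          simp only [pvAcList, if_pos h1, if_neg h2]
          exact hrec _ _ _ _ _
      · simp only [pvRleEncodeAc, if_neg h1]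
        simp only [pvAcList, if_neg h1]
        cases zrl <;> simp [hrec, pvEncA, ge_iff_le, List.append_assoc]

-- ---- characterisation of the state machine ----

lemma pvGFun_allzero (vs : List Int) (h : pvAnyNZ vs = false) :
    ∀ zc t, pvGFun vs zc t = [] := by
  induction vs with
  | nil => intro zc t; rfl
  | cons v vs ih =>
    have hv : v = 0 := by
      by_contra hv; simp [pvAnyNZ, hv] at h
    have h' : pvAnyNZ vs = false := by
      simpa [pvAnyNZ, hv] using h
    intro zc t
    subst hv
    simp only [pvGFun, if_pos rfl]
    split_ifs <;> exact ih h' _ _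

lemma pvAcList_char :
    ∀ (vs out : List Int) (zc : Int) (eob zrl : Bool) (t : List Int),
      (zrl = false → t = []) →
      ∃ zc' zrl' t', pvAcList vs out zc eob zrl t
        = (out ++ pvGFun vs zc t, zc', pvEobF vs eob, zrl', t') := by
  intro vs
  induction vs with
  | nil =>
    intro out zc eob zrl t hzt
    exact ⟨zc, zrl, t, by simp [pvAcList, pvGFun, pvEobF]⟩
  | cons v vs ih =>
    intro out zc eob zrl t hzt
    by_cases hv : v = 0
    · subst hv
      by_cases h15 : zc + 1 = 15
      · obtain ⟨zc', zrl', t', hE⟩ := ih out 0 true true (t ++ [15, 0]) (by simp)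
        refine ⟨zc', zrl', t', ?_⟩
        simp only [pvAcList, if_pos rfl, if_pos h15, hE, pvGFun, pvEobF]
        simp
      · obtain ⟨zc', zrl', t', hE⟩ := ih out (zc+1) true zrl t hzt
        refine ⟨zc', zrl', t', ?_⟩
        simp only [pvAcList, if_pos rfl, if_neg h15, hE, pvGFun, pvEobF]
        simp
    · have ht' : (if zrl then ([] : List Int) else t) = [] := by
        cases zrl
        · simpa using hzt rfl
        · rfl
      have hout : (if zrl then out ++ t else out) = out ++ t := by
        cases zrl
        · simp [hzt rfl]
        · rfl
      obtain ⟨zc', zrl', t', hE⟩ := ih ((out ++ t) ++ [zc] ++ pvEncA v) 0 false false [] (fun _ => rfl)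
      refine ⟨zc', zrl', t', ?_⟩
      have hstep : pvAcList (v :: vs) out zc eob zrl t
          = pvAcList vs ((out ++ t) ++ [zc] ++ pvEncA v) 0 false false [] := by
        simp only [pvAcList, if_neg hv, hout, ht']
      rw [hstep, hE]
      simp [pvGFun, pvEobF, hv, List.append_assoc]

lemma pvGFun_eq_emit :
    ∀ (vs : List Int) (zc : Int) (t : List Int),
      pvGFun vs zc t = (if pvAnyNZ vs then t else []) ++ pvEmitR (pvTakeNZ vs) zc := by
  intro vs
  induction vs with
  | nil => intro zc t; simp [pvGFun, pvAnyNZ, pvTakeNZ, pvEmitR]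
  | cons v vs ih =>
    intro zc t
    by_cases hv : v = 0
    · subst hv
      have hAny : pvAnyNZ (0 :: vs) = pvAnyNZ vs := by simp [pvAnyNZ]
      by_cases hz : pvAnyNZ vs = true
      · rw [show pvTakeNZ (0 :: vs) = 0 :: pvTakeNZ vs by simp [pvTakeNZ, hz], hAny, hz]
        by_cases h15 : zc + 1 = 15
        · simp only [pvGFun, if_pos rfl, if_pos h15, ih, hz]
          simp [pvEmitR, h15, List.append_assoc]
        · simp only [pvGFun, if_pos rfl, if_neg h15, ih, hz]
          simp [pvEmitR, h15]
      · have hz' : pvAnyNZ vs = false := by simpa using hz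
        have hA0 : pvAnyNZ (0 :: vs) = false := hAny.trans hz'
        rw [show pvTakeNZ (0 :: vs) = [] by simp [pvTakeNZ, hz'], hA0]
        by_cases h15 : zc + 1 = 15
        · simp only [pvGFun, if_pos h15]
          simp [pvGFun_allzero vs hz', pvEmitR]
        · simp only [pvGFun, if_neg h15]
          simp [pvGFun_allzero vs hz', pvEmitR]
    · have hAny : pvAnyNZ (v :: vs) = true := by simp [pvAnyNZ, hv]
      rw [show pvTakeNZ (v :: vs) = v :: pvTakeNZ vs by simp [pvTakeNZ, hv], hAny]
      simp only [pvGFun, if_neg hv, ih, pvEncA_eq v hv]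
      simp [pvEmitR, hv, List.append_assoc]

-- ---- B's fold and trim ----

lemma pvFoldB (core : List Int) :
    ∀ out run, (core.foldl pvStepB (out, run)).1 = out ++ pvEmitR core run := by
  induction core with
  | nil => intro out run; simp [pvEmitR]
  | cons v vs ih =>
    intro out run
    simp only [List.foldl_cons, pvStepB]
    split_ifs <;> rw [ih] <;> simp [pvEmitR, *, List.append_assoc]

lemma pvAnyNZ_concat_zero (l : List Int) : pvAnyNZ (l ++ [0]) = pvAnyNZ l := by
  simp [pvAnyNZ]

lemma pvTakeNZ_concat_zero (l : List Int) : pvTakeNZ (l ++ [0]) = pvTakeNZ l := by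
  induction l with
  | nil => simp [pvTakeNZ, pvAnyNZ]
  | cons v l ih =>
    by_cases hv : v = 0
    · simp only [List.cons_append, pvTakeNZ, pvAnyNZ_concat_zero, ih, hv]
    · simp [pvTakeNZ, hv, ih]

lemma pvTakeNZ_concat_nz (l : List Int) (v : Int) (hv : v ≠ 0) :
    pvTakeNZ (l ++ [v]) = l ++ [v] := by
  induction l with
  | nil => simp [pvTakeNZ, hv]
  | cons w l ih =>
    by_cases hw : w = 0
    · have : pvAnyNZ (l ++ [v]) = true := by simp [pvAnyNZ, hv]
      simp [pvTakeNZ, hw, this, ih]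
    · simp [pvTakeNZ, hw, ih]

lemma pvTrim_eq_takeNZ (l : List Int) : pvTrim l = pvTakeNZ l := by
  induction l using List.reverseRecOn with
  | nil => rw [pvTrim]; simp [pvTakeNZ]
  | append_singleton l a ih =>
    rw [pvTrim]
    by_cases ha : a = 0
    · subst ha
      simp [List.getLast?_concat, List.dropLast_concat, ih, pvTakeNZ_concat_zero]
    · rw [if_neg (by simp [List.getLast?_concat, ha]), pvTakeNZ_concat_nz l a ha]

lemma pvEobF_ne_nil (vs : List Int) :
    ∀ e, vs ≠ [] → pvEobF vs e = decide (vs.getLast? = some 0) := by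
  induction vs with
  | nil => intro e h; exact absurd rfl h
  | cons v vs ih =>
    intro e _
    cases vs with
    | nil => simp [pvEobF]
    | cons w vs' =>
      rw [show pvEobF (v :: w :: vs') e = pvEobF (w :: vs') (decide (v = 0)) from rfl,
        ih _ (by simp), List.getLast?_cons_cons]

lemma pvEobF_false (vs : List Int) :
    pvEobF vs false = decide (vs.getLast? = some 0) := by
  cases vs with
  | nil => simp [pvEobF]
  | cons v vs' => exact pvEobF_ne_nil (v :: vs') false (by simp)

-- ---- per-block equality ----

lemma pvBlock_eq (data : List Int) (out : List Int) (i : Int) (hi : 0 ≤ i) :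
    pvBlockA data out i = pvBlockB data out i := by
  have hac : PySem.List.slice data (some (i+1)) (some (i+64))
      = (data.drop (i+1).toNat).take 63 := by
    rw [PySem.List.slice_toNat data (by omega) (by omega),
      show (i+64).toNat - (i+1).toNat = 63 by omega]
  have hR : PySem.List.pyRange 1 64 1 = PySem.List.pyRange 1 (1 + ((63:Nat):Int)) 1 := by
    norm_num
  simp only [pvBlockA, pvBlockB]
  by_cases h0 : PySem.List.pyGetD data i 0 = 0
  · rw [if_pos h0, if_pos h0]
    obtain ⟨zc', zrl', t', hE⟩ :=
      pvAcList_char ((data.drop (i+1).toNat).take 63) (out ++ [0]) 0 false false [] (fun _ => rfl)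
    have hA : pvAcLoop data i (PySem.List.pyRange 1 64 1) (out ++ [0]) 0 false false []
        = ((out ++ [0]) ++ pvGFun ((data.drop (i+1).toNat).take 63) 0 [], zc',
           pvEobF ((data.drop (i+1).toNat).take 63) false, zrl', t') := by
      rw [hR, pvAcLoop_eq_pvAcList data i hi 63 1 one_pos]; exact hE
    rw [hA, hac, pvTrim_eq_takeNZ, pvFoldB, pvGFun_eq_emit, pvEobF_false]
    simp [List.append_assoc]
  · rw [if_neg h0, if_neg h0, pvDCbits _ h0]
    obtain ⟨zc', zrl', t', hE⟩ :=
      pvAcList_char ((data.drop (i+1).toNat).take 63)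
        (out ++ [((pvMagBits (PySem.List.pyGetD data i 0)).length : Int)]
           ++ pvMagBits (PySem.List.pyGetD data i 0)) 0 false false [] (fun _ => rfl)
    have hA : pvAcLoop data i (PySem.List.pyRange 1 64 1)
        (out ++ [((pvMagBits (PySem.List.pyGetD data i 0)).length : Int)]
           ++ pvMagBits (PySem.List.pyGetD data i 0)) 0 false false []
        = ((out ++ [((pvMagBits (PySem.List.pyGetD data i 0)).length : Int)]
             ++ pvMagBits (PySem.List.pyGetD data i 0))
             ++ pvGFun ((data.drop (i+1).toNat).take 63) 0 [], zc',
           pvEobF ((data.drop (i+1).toNat).take 63) false, zrl', t') := by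
      rw [hR, pvAcLoop_eq_pvAcList data i hi 63 1 one_pos]; exact hE
    rw [hA, hac, pvTrim_eq_takeNZ, pvFoldB, pvGFun_eq_emit, pvEobF_false]
    simp [List.append_assoc]

-- ===== VERDICT (by name: the statement is the Claim_ definition above) =====
theorem preparing_for_coding_dc_and_ac_spec : Claim_equal_preparing_for_coding_dc_and_ac := by
  intro data _
  unfold Spec_preparing_for_coding_dc_and_ac
  unfold preparing_for_coding_dc_and_ac preparing_for_coding_dc_and_ac_alt
  apply PySem.List.foldl_congr_mem
  intro acc x hx
  have hx0 : 0 ≤ x := by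
    rcases (PySem.List.mem_pyRange_iff_of_pos (by norm_num) x).1 hx with ⟨h1, _, _⟩
    exact h1
  exact pvBlock_eq _ acc x hx0
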